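-- pv_equiv track=rewrite | github.com/ChenBingwei/Algorithm_geekbang_fifth | week02/example/ltc30_substring_with_concatenation_of_all_words.py | valid_compare
-- ===== SOURCE A (Python) =====
-- def valid_compare(s, words):
--     words_fre_dict = {}
--     for word in words:
--         words_fre_dict.setdefault(word, 0)
--         words_fre_dict[word] += 1
--
--     sub_str_dict = {}
--     for i in range(0, len(s), len(words[0])):
--         sub_str = s[i:i + len(words[0])]
--         sub_str_dict.setdefault(sub_str, 0)
--         sub_str_dict[sub_str] += 1
--
--     return sub_str_dict == words_fre_dict
-- ===== SOURCE B (Python) =====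
-- def valid_compare(s, words):
--     chunks = []
--     for i in range(0, len(s), len(words[0])):
--         chunks.append(s[i:i + len(words[0])])
--     return sorted(chunks) == sorted(words)
-- ===== Notes on version B (the rewrite author's own statement) =====
-- stated objective: alternative
-- what changed: B keeps the same chunking loop over s but compares the chunk list against words by sorting both lists (sorted(chunks) == sorted(words)) instead of building and comparing two frequency dicts.
import Mathlib
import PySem

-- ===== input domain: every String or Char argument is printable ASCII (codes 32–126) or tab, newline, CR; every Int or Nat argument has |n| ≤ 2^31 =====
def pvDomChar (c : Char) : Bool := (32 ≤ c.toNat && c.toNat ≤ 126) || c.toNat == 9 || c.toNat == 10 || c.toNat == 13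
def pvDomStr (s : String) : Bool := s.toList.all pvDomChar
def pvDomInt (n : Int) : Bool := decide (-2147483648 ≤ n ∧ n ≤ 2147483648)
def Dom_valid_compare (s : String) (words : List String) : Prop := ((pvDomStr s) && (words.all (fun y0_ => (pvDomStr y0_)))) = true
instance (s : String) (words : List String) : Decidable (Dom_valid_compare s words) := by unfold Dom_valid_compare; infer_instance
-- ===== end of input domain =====

-- B trades A's two frequency dicts for sorting both lists (alternative decomposition, not claimed faster).

-- ===== PORT A =====
-- Python's dict '==' ignores insertion order: both dicts agree on every key of either.
def pyDictEq (d1 d2 : PySem.Dict String Int) : Bool :=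
  d1.items.all (fun p => d2.get? p.1 == some p.2) &&
  d2.items.all (fun p => d1.get? p.1 == some p.2)

def valid_compare (s : String) (words : List String) : Bool :=
  -- words_fre_dict loop: setdefault(word, 0) then words_fre_dict[word] += 1
  let wdict := words.foldl
    (fun d w => let d := d.setdefault w 0; d.insert w (d.getD w 0 + 1)) PySem.Dict.empty
  match PySem.List.pyGet? words 0 with   -- words[0]: IndexError (none) excluded by Pre_
  | none => false
  | some w0 =>
    let k := PySem.Str.len w0
    let sdict := (PySem.List.pyRange 0 (PySem.Str.len s) k).foldl
      (fun d i =>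
        let sub := PySem.Str.slice s (some i) (some (i + k))
        let d := d.setdefault sub 0; d.insert sub (d.getD sub 0 + 1)) PySem.Dict.empty
    pyDictEq sdict wdict

-- ===== PORT B =====
def valid_compare_alt (s : String) (words : List String) : Bool :=
  match PySem.List.pyGet? words 0 with   -- words[0]: IndexError (none) excluded by Pre_
  | none => false
  | some w0 =>
    let k := PySem.Str.len w0
    let chunks := (PySem.List.pyRange 0 (PySem.Str.len s) k).foldl
      (fun acc i => acc ++ [PySem.Str.slice s (some i) (some (i + k))]) []
    decide (PySem.List.sorted chunks (fun x => x) false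
            = PySem.List.sorted words (fun x => x) false)

-- ===== PRECONDITION & SPEC =====
-- Pre_ excludes exactly where A raises: words = [] (IndexError on words[0]) and words[0] = "" (range step 0, ValueError).
def Pre_valid_compare (s : String) (words : List String) : Prop :=
  words ≠ [] ∧ words.headD "" ≠ ""
instance (s : String) (words : List String) : Decidable (Pre_valid_compare s words) := by
  unfold Pre_valid_compare; infer_instance
def pvWitness_valid_compare : String × List String := ("abcd", ["cd", "ab"])

def Spec_valid_compare (s : String) (words : List String) (out : Bool) : Prop := out = valid_compare_alt s words
instance (s : String) (words : List String) (out : Bool) : Decidable (Spec_valid_compare s words out) := by unfold Spec_valid_compare; infer_instance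

-- ===== CLAIM (what is proved, stated in full; the proofs are below) =====
def Claim_equal_valid_compare : Prop := ∀ (s : String) (words : List String), Dom_valid_compare s words → Pre_valid_compare s words → Spec_valid_compare s words (valid_compare s words)

-- ===== LEMMAS AND PROOFS =====

-- A's setdefault-then-increment step is the plain counting insert step.
theorem step_eq (d : PySem.Dict String Int) (w : String) :
    (d.setdefault w 0).insert w ((d.setdefault w 0).getD w 0 + 1)
      = d.insert w (d.getD w 0 + 1) := by
  by_cases h : d.contains w = true
  · rw [PySem.Dict.setdefault_of_contains d 0 h]
  · have h' : d.contains w = false := by simpa using h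
    rw [PySem.Dict.setdefault_of_not_contains d 0 h',
      PySem.Dict.getD_insert_self, PySem.Dict.insert_insert_self,
      PySem.Dict.getD_of_not_contains d 0 h']

theorem bag_eq_counter (l : List String) :
    l.foldl (fun d w => (d.setdefault w 0).insert w ((d.setdefault w 0).getD w 0 + 1))
        PySem.Dict.empty
      = PySem.Dict.counter l := by
  rw [show (fun (d : PySem.Dict String Int) w =>
        (d.setdefault w 0).insert w ((d.setdefault w 0).getD w 0 + 1))
      = (fun d w => d.insert w (d.getD w 0 + 1)) from funext fun d => funext fun w => step_eq d w]
  exact PySem.Dict.foldl_insert_getD_add_one_eq_counter l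

theorem counter_get?_eq_some_iff (l : List String) (k : String) (v : Int) :
    (PySem.Dict.counter l).get? k = some v ↔ k ∈ l ∧ v = (l.count k : Int) := by
  rw [PySem.Dict.get?_eq_some_iff_mem_items _ _ _ (PySem.Dict.nodup_keys_counter l),
    PySem.Dict.items_counter]
  simp [PySem.Set.mem_ofList, Prod.ext_iff, eq_comm]

theorem pyDictEq_counter_iff_perm (l1 l2 : List String) :
    pyDictEq (PySem.Dict.counter l1) (PySem.Dict.counter l2) = true ↔ l1.Perm l2 := by
  unfold pyDictEq
  simp only [Bool.and_eq_true, List.all_eq_true, beq_iff_eq, PySem.Dict.items_counter,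
    List.mem_map, PySem.Set.mem_ofList, forall_exists_index, and_imp]
  constructor
  · rintro ⟨h1, h2⟩
    rw [List.perm_iff_count]
    intro a
    by_cases ha1 : a ∈ l1
    · have := (counter_get?_eq_some_iff l2 a (l1.count a : Int)).mp
        (h1 (a, (l1.count a : Int)) a ha1 rfl)
      exact_mod_cast this.2
    · by_cases ha2 : a ∈ l2
      · have := (counter_get?_eq_some_iff l1 a (l2.count a : Int)).mp
          (h2 (a, (l2.count a : Int)) a ha2 rfl)
        exact_mod_cast this.2.symm
      · rw [List.count_eq_zero_of_not_mem ha1, List.count_eq_zero_of_not_mem ha2]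
  · intro hp
    have hc : ∀ a, l1.count a = l2.count a := List.perm_iff_count.mp hp
    constructor
    · rintro p a ha rfl
      exact (counter_get?_eq_some_iff l2 a _).mpr ⟨hp.mem_iff.mp ha, by simp [hc a]⟩
    · rintro p a ha rfl
      exact (counter_get?_eq_some_iff l1 a _).mpr ⟨hp.mem_iff.mpr ha, by simp [hc a]⟩

-- ===== VERDICT (by name: the statement is the Claim_ definition above) =====
theorem valid_compare_spec : Claim_equal_valid_compare := by
  intro s words _ _
  unfold Spec_valid_compare valid_compare valid_compare_alt
  cases hw : PySem.List.pyGet? words 0 with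
  | none => rfl
  | some w0 =>
    simp only
    rw [PySem.List.foldl_append_singleton_eq_map
      (fun i => PySem.Str.slice s (some i) (some (i + PySem.Str.len w0)))
      (PySem.List.pyRange 0 (PySem.Str.len s) (PySem.Str.len w0)) []]
    rw [show List.foldl
        (fun (d : PySem.Dict String Int) i =>
          (d.setdefault (PySem.Str.slice s (some i) (some (i + PySem.Str.len w0))) 0).insert
            (PySem.Str.slice s (some i) (some (i + PySem.Str.len w0)))
            ((d.setdefault (PySem.Str.slice s (some i) (some (i + PySem.Str.len w0))) 0).getD
                (PySem.Str.slice s (some i) (some (i + PySem.Str.len w0))) 0 + 1))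
        PySem.Dict.empty (PySem.List.pyRange 0 (PySem.Str.len s) (PySem.Str.len w0))
      = List.foldl
        (fun (d : PySem.Dict String Int) sub =>
          (d.setdefault sub 0).insert sub ((d.setdefault sub 0).getD sub 0 + 1))
        PySem.Dict.empty
        ((PySem.List.pyRange 0 (PySem.Str.len s) (PySem.Str.len w0)).map
          (fun i => PySem.Str.slice s (some i) (some (i + PySem.Str.len w0))))
      from (List.foldl_map (f := fun i => PySem.Str.slice s (some i) (some (i + PySem.Str.len w0))) (g := fun (d : PySem.Dict String Int) sub => (d.setdefault sub 0).insert sub ((d.setdefault sub 0).getD sub 0 + 1))).symm]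
    rw [bag_eq_counter, bag_eq_counter]
    rw [Bool.eq_iff_iff, pyDictEq_counter_iff_perm]
    simp only [decide_eq_true_eq, List.nil_append]
    exact (PySem.List.sorted_id_eq_sorted_id_iff_perm _ _).symm
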